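-- pv_equiv track=rewrite | github.com/baoy-nlp/DSS-VAE | dss_vae/utils/nn_funcs.py | input_padding
-- ===== SOURCE A (Python) =====
-- def input_padding(sents, pad_token, max_len=-1):
--     if max_len == -1:
--         max_len = max(len(s) for s in sents)
--     batch_size = len(sents)
--     seqs_t = []
--     masks = []
--     for i in range(max_len):
--         seqs_t.append([sents[k][i] if len(sents[k]) > i else pad_token for k in range(batch_size)])
--         masks.append([1 if len(sents[k]) > i else 0 for k in range(batch_size)])
--     return seqs_t, masks
-- ===== SOURCE B (Python) =====
-- def input_padding(sents, pad_token, max_len=-1):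
--     if max_len == -1:
--         max_len = max(len(s) for s in sents)
--     m = max(max_len, 0)
--     padded = [list(s[:m]) + [pad_token] * (m - len(s)) for s in sents]
--     mask_rows = [[1] * min(len(s), m) + [0] * (m - min(len(s), m)) for s in sents]
--     if sents:
--         seqs_t = [list(col) for col in zip(*padded)]
--         masks = [list(col) for col in zip(*mask_rows)]
--     else:
--         seqs_t = [[] for _ in range(m)]
--         masks = [[] for _ in range(m)]
--     return seqs_t, masks
-- ===== Notes on version B (the rewrite author's own statement) =====
-- stated objective: idiomatic
-- what changed: A fills the transposed output cell by cell, indexing sents[k][i] inside a position-major double loop; B builds each padded row and its mask row once per sentence and then transposes with zip(*rows), with an explicit empty-batch fallback.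
import Mathlib
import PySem

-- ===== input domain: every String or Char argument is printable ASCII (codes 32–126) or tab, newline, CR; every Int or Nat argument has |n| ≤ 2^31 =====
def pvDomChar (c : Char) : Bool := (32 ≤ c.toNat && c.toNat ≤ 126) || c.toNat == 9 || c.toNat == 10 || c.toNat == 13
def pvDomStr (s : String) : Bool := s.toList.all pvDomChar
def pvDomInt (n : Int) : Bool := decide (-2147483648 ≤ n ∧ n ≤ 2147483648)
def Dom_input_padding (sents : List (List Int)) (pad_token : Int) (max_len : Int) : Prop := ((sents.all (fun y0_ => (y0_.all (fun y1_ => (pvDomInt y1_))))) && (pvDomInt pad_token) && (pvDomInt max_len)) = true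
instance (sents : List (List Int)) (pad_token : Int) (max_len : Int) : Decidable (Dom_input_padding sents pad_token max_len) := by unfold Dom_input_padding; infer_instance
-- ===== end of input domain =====

-- B replaces A's position-major cell-by-cell construction by building padded rows and transposing them (row-build-then-zip decomposition); return value only, no mutation.

-- ===== PORT A =====
def input_padding (sents : List (List Int)) (pad_token : Int) (max_len : Int) : List (List Int) × List (List Int) :=
  -- A note: if max_len == -1: max_len = max(len(s) for s in sents)  (max over empty raises; excluded by Pre_)
  let ml : Int := if max_len = -1 then
      (PySem.List.max? (sents.map (fun s => (s.length : Int))) (fun x => x)).getD 0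
    else max_len
  let batch_size : Int := sents.length
  let seqs_t := (PySem.List.pyRange 0 ml 1).map (fun i =>
      (PySem.List.pyRange 0 batch_size 1).map (fun k =>
        if ((PySem.List.pyGetD sents k []).length : Int) > i then
          PySem.List.pyGetD (PySem.List.pyGetD sents k []) i 0
        else pad_token))
  let masks := (PySem.List.pyRange 0 ml 1).map (fun i =>
      (PySem.List.pyRange 0 batch_size 1).map (fun k =>
        if ((PySem.List.pyGetD sents k []).length : Int) > i then (1 : Int) else 0))
  (seqs_t, masks)

-- ===== PORT B =====
-- zip(*rows) for a non-empty list of rows: take heads while every row is non-empty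
def pvZipStar : List Int → List (List Int) → List (List Int)
  | [], _ => []
  | h :: t, rest =>
    if rest.all (fun r => r ≠ []) then
      (h :: rest.map (fun r => r.headD 0)) :: pvZipStar t (rest.map List.tail)
    else []

def pvZipStarRows : List (List Int) → List (List Int)
  | [] => []
  | r :: rs => pvZipStar r rs

def input_padding_alt (sents : List (List Int)) (pad_token : Int) (max_len : Int) : List (List Int) × List (List Int) :=
  let ml : Int := if max_len = -1 then
      (PySem.List.max? (sents.map (fun s => (s.length : Int))) (fun x => x)).getD 0
    else max_len
  let m : Int := max ml 0
  let padded := sents.map (fun s =>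
      PySem.List.slice s none (some m) ++ List.replicate (m.toNat - s.length) pad_token)
  let mask_rows := sents.map (fun s =>
      List.replicate (min s.length m.toNat) (1 : Int) ++ List.replicate (m.toNat - min s.length m.toNat) 0)
  if sents.isEmpty then (List.replicate m.toNat [], List.replicate m.toNat [])
  else (pvZipStarRows padded, pvZipStarRows mask_rows)

-- ===== PRECONDITION & SPEC =====
-- Pre_ excludes only (sents = [], max_len = -1), where A's max() over an empty sequence raises ValueError (B raises likewise).
def Pre_input_padding (sents : List (List Int)) (pad_token : Int) (max_len : Int) : Prop :=
  ¬ (max_len = -1 ∧ sents = [])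
instance (sents : List (List Int)) (pad_token : Int) (max_len : Int) : Decidable (Pre_input_padding sents pad_token max_len) := by unfold Pre_input_padding; infer_instance
def pvWitness_input_padding : List (List Int) × Int × Int := ([[3], [1, 2]], 0, -1)

def Spec_input_padding (sents : List (List Int)) (pad_token : Int) (max_len : Int) (out : List (List Int) × List (List Int)) : Prop := out = input_padding_alt sents pad_token max_len
instance (sents : List (List Int)) (pad_token : Int) (max_len : Int) (out : List (List Int) × List (List Int)) : Decidable (Spec_input_padding sents pad_token max_len out) := by unfold Spec_input_padding; infer_instance

-- ===== CLAIM (what is proved, stated in full; the proofs are below) =====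
def Claim_equal_input_padding : Prop := ∀ (sents : List (List Int)) (pad_token : Int) (max_len : Int), Dom_input_padding sents pad_token max_len → Pre_input_padding sents pad_token max_len → Spec_input_padding sents pad_token max_len (input_padding sents pad_token max_len)

-- ===== LEMMAS AND PROOFS =====

theorem pvZipStar_eq (first : List Int) (rest : List (List Int)) (n : Nat)
    (h1 : first.length = n) (h2 : ∀ r ∈ rest, r.length = n) :
    pvZipStar first rest
      = (List.range n).map (fun i => (first :: rest).map (fun r => r.getD i 0)) := by
  induction first generalizing rest n with
  | nil => subst h1; simp [pvZipStar]
  | cons h t ih =>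
    subst h1
    have hne : rest.all (fun r => r ≠ []) = true := by
      simp only [List.all_eq_true, decide_eq_true_eq]
      intro r hr
      have := h2 r hr
      intro hnil; subst hnil; simp at this
    rw [pvZipStar, if_pos hne]
    simp only [List.length_cons, List.range_succ_eq_map, List.map_cons, List.map_map]
    congr 1
    · simp only [List.getD_cons_zero]
      refine congrArg (h :: ·) (List.map_congr_left ?_)
      intro r hr
      have := h2 r hr
      cases r with
      | nil => simp at this
      | cons a b => simp
    · rw [ih (rest.map List.tail) t.length rfl ?_]
      · refine congrArg (List.map · (List.range t.length)) ?_
        funext i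
        simp only [Function.comp_apply, List.map_cons, List.getD_cons_succ, List.map_map]
        refine congrArg (t.getD i 0 :: ·) (List.map_congr_left ?_)
        intro r hr
        have := h2 r hr
        cases r with
        | nil => simp at this
        | cons a b => simp
      · intro r hr
        simp only [List.mem_map] at hr
        obtain ⟨s, hs, rfl⟩ := hr
        have := h2 s hs
        cases s with
        | nil => simp at this
        | cons a b => simpa using this

theorem getD_replicate_int (k i : Nat) (c : Int) (h : i < k) :
    (List.replicate k c).getD i 0 = c := by
  simp [List.getD, h]

theorem pad_row_getD (s : List Int) (pad : Int) (n i : Nat) (hi : i < n) :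
    (s.take n ++ List.replicate (n - s.length) pad).getD i 0
      = if i < s.length then s.getD i 0 else pad := by
  by_cases h : i < s.length
  · rw [if_pos h]
    have hlt : i < (s.take n).length := by simp; omega
    rw [List.getD_append _ _ _ _ hlt]
    simp [List.getD, hi]
  · rw [if_neg h]
    have hge : (s.take n).length ≤ i := by simp; omega
    rw [List.getD_append_right _ _ _ _ hge]
    exact getD_replicate_int _ _ _ (by simp; omega)

theorem mask_row_getD (s : List Int) (n i : Nat) (hi : i < n) :
    (List.replicate (min s.length n) (1 : Int) ++ List.replicate (n - min s.length n) 0).getD i 0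
      = if i < s.length then (1 : Int) else 0 := by
  by_cases h : i < s.length
  · rw [if_pos h]
    have hlt : i < (List.replicate (min s.length n) (1 : Int)).length := by simp; omega
    rw [List.getD_append _ _ _ _ hlt]
    exact getD_replicate_int _ _ _ (by simp; omega)
  · rw [if_neg h]
    have hge : (List.replicate (min s.length n) (1 : Int)).length ≤ i := by simp; omega
    rw [List.getD_append_right _ _ _ _ hge]
    exact getD_replicate_int _ _ _ (by simp; omega)

-- A's column i, as a map over sents
theorem a_col_eq (sents : List (List Int)) (g : List Int → Int → Int) (i : Int) :
    (PySem.List.pyRange 0 (sents.length : Int) 1).map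
        (fun k => g (PySem.List.pyGetD sents k []) i)
      = sents.map (fun s => g s i) := by
  have := PySem.List.map_pyGetD_pyRange_zero' sents ([] : List Int)
  calc (PySem.List.pyRange 0 (sents.length : Int) 1).map
        (fun k => g (PySem.List.pyGetD sents k []) i)
      = ((PySem.List.pyRange 0 (sents.length : Int) 1).map
          (fun k => PySem.List.pyGetD sents k [])).map (fun s => g s i) := by
        rw [List.map_map]; rfl
    _ = sents.map (fun s => g s i) := by rw [this]

theorem body_eq (sents : List (List Int)) (pad_token : Int) (m : Int) :
    ((PySem.List.pyRange 0 m 1).map (fun i =>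
        (PySem.List.pyRange 0 (sents.length : Int) 1).map (fun k =>
          if ((PySem.List.pyGetD sents k []).length : Int) > i then
            PySem.List.pyGetD (PySem.List.pyGetD sents k []) i 0
          else pad_token)),
      (PySem.List.pyRange 0 m 1).map (fun i =>
        (PySem.List.pyRange 0 (sents.length : Int) 1).map (fun k =>
          if ((PySem.List.pyGetD sents k []).length : Int) > i then (1 : Int) else 0)))
    = (if sents.isEmpty then
        (List.replicate (max m 0).toNat ([] : List Int), List.replicate (max m 0).toNat ([] : List Int))
      else
        (pvZipStarRows (sents.map (fun s =>
            PySem.List.slice s none (some (max m 0)) ++ List.replicate ((max m 0).toNat - s.length) pad_token)),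
         pvZipStarRows (sents.map (fun s =>
            List.replicate (min s.length (max m 0).toNat) (1 : Int) ++ List.replicate ((max m 0).toNat - min s.length (max m 0).toNat) 0)))) := by
  have hmax0 : (0 : Int) ≤ max m 0 := le_max_right m 0
  have hnn : (max m 0).toNat = m.toNat := by omega
  have hslice : ∀ s : List Int, PySem.List.slice s none (some (max m 0)) = s.take m.toNat := by
    intro s; rw [PySem.List.slice_to s hmax0, hnn]
  -- normalize A's outer range to List.range m.toNat
  have hrange : PySem.List.pyRange 0 m 1 = (List.range m.toNat).map (fun k : Nat => (k : Int)) := by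
    rw [PySem.List.pyRange_one, Int.sub_zero]
    exact List.map_congr_left (fun k _ => by simp)
  rw [hrange, hnn]
  set n := m.toNat with hn
  -- rewrite each A column with a_col_eq, then evaluate the cells on natural i
  have hseqA : ∀ i : Nat,
      (PySem.List.pyRange 0 (sents.length : Int) 1).map (fun k =>
          if ((PySem.List.pyGetD sents k []).length : Int) > (i : Int) then
            PySem.List.pyGetD (PySem.List.pyGetD sents k []) (i : Int) 0
          else pad_token)
        = sents.map (fun s => if i < s.length then s.getD i 0 else pad_token) := by
    intro i
    rw [a_col_eq sents (fun s j => if (s.length : Int) > j then PySem.List.pyGetD s j 0 else pad_token) (i : Int)]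
    refine List.map_congr_left ?_
    intro s _
    by_cases h : i < s.length
    · rw [if_pos (by exact_mod_cast h), if_pos h, PySem.List.pyGetD_natCast]
    · rw [if_neg (by exact_mod_cast h), if_neg h]
  have hmaskA : ∀ i : Nat,
      (PySem.List.pyRange 0 (sents.length : Int) 1).map (fun k =>
          if ((PySem.List.pyGetD sents k []).length : Int) > (i : Int) then (1 : Int) else 0)
        = sents.map (fun s => if i < s.length then (1 : Int) else 0) := by
    intro i
    rw [a_col_eq sents (fun s j => if (s.length : Int) > j then (1 : Int) else 0) (i : Int)]
    refine List.map_congr_left ?_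
    intro s _
    by_cases h : i < s.length
    · rw [if_pos (by exact_mod_cast h), if_pos h]
    · rw [if_neg (by exact_mod_cast h), if_neg h]
  cases sents with
  | nil =>
    simp [Function.comp_def]
  | cons s0 ss =>
    rw [if_neg (by simp)]
    have hpadlen : ∀ s : List Int,
        (PySem.List.slice s none (some (max m 0)) ++ List.replicate (n - s.length) pad_token).length = n := by
      intro s; rw [hslice s]; simp only [List.length_append, List.length_take, List.length_replicate]; omega
    have hmasklen : ∀ s : List Int,
        (List.replicate (min s.length n) (1 : Int) ++ List.replicate (n - min s.length n) 0).length = n := by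
      intro s; simp only [List.length_append, List.length_replicate]; omega
    refine Prod.ext ?_ ?_
    · -- sequences
      simp only [List.map_cons, pvZipStarRows, List.map_map]
      rw [pvZipStar_eq _ _ n (hpadlen s0)
        (by intro r hr; simp only [List.mem_map] at hr; obtain ⟨s, _, rfl⟩ := hr; exact hpadlen s)]
      refine List.map_congr_left ?_
      intro i hi
      rw [List.mem_range] at hi
      simp only [Function.comp_apply]
      rw [hseqA i]
      have hcell : ∀ s : List Int,
          (PySem.List.slice s none (some (max m 0)) ++ List.replicate (n - s.length) pad_token).getD i 0
            = if i < s.length then s.getD i 0 else pad_token := by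
        intro s; rw [hslice s, pad_row_getD s pad_token n i hi]
      simp only [List.map_cons, List.map_map]
      rw [hcell s0]
      refine congrArg _ (List.map_congr_left ?_)
      intro s _
      simp only [Function.comp_apply]
      exact (hcell s).symm
    · -- masks
      simp only [List.map_cons, pvZipStarRows, List.map_map]
      rw [pvZipStar_eq _ _ n (hmasklen s0)
        (by intro r hr; simp only [List.mem_map] at hr; obtain ⟨s, _, rfl⟩ := hr; exact hmasklen s)]
      refine List.map_congr_left ?_
      intro i hi
      rw [List.mem_range] at hi
      simp only [Function.comp_apply]
      rw [hmaskA i]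
      simp only [List.map_cons, List.map_map]
      rw [mask_row_getD s0 n i hi]
      refine congrArg _ (List.map_congr_left ?_)
      intro s _
      simp only [Function.comp_apply]
      exact (mask_row_getD s n i hi).symm

-- ===== VERDICT (by name: the statement is the Claim_ definition above) =====
theorem input_padding_spec : Claim_equal_input_padding := by
  intro sents pad_token max_len _ _
  unfold Spec_input_padding input_padding input_padding_alt
  exact body_eq sents pad_token _
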